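-- pv_equiv track=rewrite | github.com/Maniredii/Auto-Job-Applier | src/scrapers/angellist_scraper.py | _extract_job_id
-- ===== SOURCE A (Python) =====
-- def _extract_job_id(url: str) -> str:
--     """Extract job ID from URL"""
--     try:
--         if url:
--             # AngelList URLs typically have format: /jobs/123456-job-title-at-company
--             parts = url.split('/')
--             for part in parts:
--                 if part and part[0].isdigit():
--                     # Extract numeric part before the dash
--                     job_id = part.split('-')[0]
--                     if job_id.isdigit():
--                         return job_id
--         return ""
--     except:
--         return ""
-- ===== SOURCE B (Python) =====
-- def _extract_job_id(url: str) -> str: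
--     """Extract job ID from URL: single left-to-right character scan, no splitting."""
--     s = url
--     i, n = 0, len(s)
--     while i < n:
--         # scan the digit run at the start of the current '/'-segment
--         j = i
--         while j < n and s[j].isdigit():
--             j += 1
--         if j > i and (j == n or s[j] == '-' or s[j] == '/'):
--             return s[i:j]
--         # skip to the start of the next segment
--         while i < n and s[i] != '/':
--             i += 1
--         i += 1
--     return ""
-- ===== Notes on version B (the rewrite author's own statement) =====
-- stated objective: alternative
-- what changed: B replaces A's two-level splitting (split the URL on slashes, then split each candidate segment on dashes and test the piece) by a single left-to-right index scan that reads each digit run and checks its boundary characters directly, never materialising the segment lists.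
import Mathlib
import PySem

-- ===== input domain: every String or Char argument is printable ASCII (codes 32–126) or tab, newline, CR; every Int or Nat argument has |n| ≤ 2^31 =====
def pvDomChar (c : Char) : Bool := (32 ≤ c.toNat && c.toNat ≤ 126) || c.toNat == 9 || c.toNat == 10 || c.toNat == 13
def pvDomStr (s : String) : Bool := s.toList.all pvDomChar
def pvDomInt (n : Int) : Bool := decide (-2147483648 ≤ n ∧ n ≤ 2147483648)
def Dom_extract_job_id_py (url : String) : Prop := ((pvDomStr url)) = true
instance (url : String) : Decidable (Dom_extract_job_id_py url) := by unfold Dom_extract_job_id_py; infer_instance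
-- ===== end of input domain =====

-- B replaces A's split('/') / split('-') passes by one character scan; return values proved equal on all strings.

-- ===== PORT A =====
-- Python: the part[0].isdigit() read (guarded by part's truthiness in aLoop)
def aPartDigit : List Char → Bool
  | [] => false
  | c :: _ => PySem.Chars.isdigit c

-- the `for part in parts:` loop with its early return ([] = "" = "no id found")
def aLoop : List (List Char) → List Char
  | [] => []
  | p :: rest =>
    if !p.isEmpty && aPartDigit p then
      let job_id := (PySem.Chars.splitOn p ['-']).headD []   -- part.split('-')[0]
      if PySem.Chars.strIsdigit job_id then job_id else aLoop rest
    else aLoop rest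

def extract_job_id_py (url : String) : String :=
  if url ≠ "" then String.ofList (aLoop (PySem.Chars.splitOn url.toList ['/']))
  else ""

-- ===== PORT B =====
-- `while j < n and s[j].isdigit(): j += 1` — the digit run at the front, and what follows it
def bDigits : List Char → List Char × List Char
  | [] => ([], [])
  | c :: rest =>
    if PySem.Chars.isdigit c then
      let p := bDigits rest
      (c :: p.1, p.2)
    else ([], c :: rest)

-- `while i < n and s[i] != '/': i += 1 ; i += 1` — skip to the start of the next segment
def bSkip : List Char → List Char
  | [] => []
  | c :: rest => if c = '/' then rest else bSkip rest

-- needed by bLoop's termination proof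
theorem bSkip_length_le : ∀ l : List Char, (bSkip l).length ≤ l.length := by
  intro l
  induction l with
  | nil => simp [bSkip]
  | cons c rest ih =>
    simp only [bSkip]
    split
    · simp
    · exact Nat.le_succ_of_le ih

-- the outer `while i < n:` loop
def bLoop (l : List Char) : List Char :=
  match l with
  | [] => []
  | c :: rest =>
    let d := bDigits (c :: rest)
    if !d.1.isEmpty && (d.2.isEmpty || d.2.headD ' ' == '-' || d.2.headD ' ' == '/') then d.1
    else bLoop (bSkip (c :: rest))
termination_by l.length
decreasing_by
  simp only [bSkip]
  split
  · simp
  · exact Nat.lt_succ_of_le (bSkip_length_le rest)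

def extract_job_id_py_alt (url : String) : String := String.ofList (bLoop url.toList)

-- ===== PRECONDITION & SPEC =====
def Spec_extract_job_id_py (url : String) (out : String) : Prop := out = extract_job_id_py_alt url
instance (url : String) (out : String) : Decidable (Spec_extract_job_id_py url out) := by unfold Spec_extract_job_id_py; infer_instance

-- ===== CLAIM (what is proved, stated in full; the proofs are below) =====
def Claim_equal_extract_job_id_py : Prop := ∀ (url : String), Dom_extract_job_id_py url → Spec_extract_job_id_py url (extract_job_id_py url)

-- ===== LEMMAS AND PROOFS =====

-- structural form of Python's single-character-separator split
def sp (sep : Char) : List Char → List (List Char)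
  | [] => [[]]
  | c :: rest =>
    if c = sep then [] :: sp sep rest
    else
      match sp sep rest with
      | [] => [[c]]
      | s :: ss => (c :: s) :: ss

theorem sp_ne_nil (sep : Char) (l : List Char) : sp sep l ≠ [] := by
  cases l with
  | nil => simp [sp]
  | cons c rest =>
    simp only [sp]
    split
    · simp
    · split <;> simp

theorem go_spec (sep : Char) : ∀ (fuel : Nat) (l cur : List Char) (acc : List (List Char)),
    l.length < fuel →
    PySem.Chars.splitOn.go [sep] fuel l cur acc =
      acc.reverse ++ (cur.reverse ++ (sp sep l).headD []) :: (sp sep l).tail := by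
  intro fuel
  induction fuel with
  | zero => intro l cur acc h; exact absurd h (by omega)
  | succ fuel ih =>
    intro l cur acc h
    cases l with
    | nil => simp [PySem.Chars.splitOn.go, sp]
    | cons c rest =>
      obtain ⟨s, ss, hs⟩ : ∃ s ss, sp sep rest = s :: ss := by
        cases hsp : sp sep rest with
        | nil => exact absurd hsp (sp_ne_nil sep rest)
        | cons s ss => exact ⟨s, ss, rfl⟩
      by_cases hc : c = sep
      · subst hc
        rw [show PySem.Chars.splitOn.go [c] (fuel + 1) (c :: rest) cur acc =
              PySem.Chars.splitOn.go [c] fuel rest [] (cur.reverse :: acc) by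
            simp [PySem.Chars.splitOn.go, List.isPrefixOf]]
        rw [ih rest [] (cur.reverse :: acc) (by simp at h; omega)]
        simp [sp, hs]
      · rw [show PySem.Chars.splitOn.go [sep] (fuel + 1) (c :: rest) cur acc =
              PySem.Chars.splitOn.go [sep] fuel rest (c :: cur) acc by
            simp [PySem.Chars.splitOn.go, List.isPrefixOf, Ne.symm hc]]
        rw [ih rest (c :: cur) acc (by simp at h; omega)]
        simp [sp, hc, hs]

theorem splitOn_single (sep : Char) (l : List Char) :
    PySem.Chars.splitOn l [sep] = sp sep l := by
  have := go_spec sep (l.length + 1) l [] [] (by omega)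
  obtain ⟨s, ss, hs⟩ : ∃ s ss, sp sep l = s :: ss := by
    cases hsp : sp sep l with
    | nil => exact absurd hsp (sp_ne_nil sep l)
    | cons s ss => exact ⟨s, ss, rfl⟩
  rw [PySem.Chars.splitOn, this, hs]
  simp

theorem sp_eq (sep : Char) (l : List Char) :
    sp sep l = (l.takeWhile (fun c => c != sep)) ::
      (match l.dropWhile (fun c => c != sep) with
       | [] => []
       | _ :: rest => sp sep rest) := by
  induction l with
  | nil => simp [sp]
  | cons c rest ih =>
    by_cases hc : c = sep
    · subst hc
      simp [sp]
    · have h1 : (c != sep) = true := by simp [hc]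
      simp only [sp, if_neg hc, List.takeWhile_cons, List.dropWhile_cons, h1, if_pos]
      rw [ih]

theorem bDigits_spec (l : List Char) :
    bDigits l = (l.takeWhile PySem.Chars.isdigit, l.dropWhile PySem.Chars.isdigit) := by
  induction l with
  | nil => simp [bDigits]
  | cons c rest ih =>
    simp only [bDigits, List.takeWhile_cons, List.dropWhile_cons, ih]
    split <;> simp_all

theorem bSkip_spec (l : List Char) :
    bSkip l = (l.dropWhile (fun c => c != '/')).tail := by
  induction l with
  | nil => simp [bSkip]
  | cons c rest ih =>
    simp only [bSkip, List.dropWhile_cons]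
    by_cases h : c = '/'
    · simp [h]
    · have h1 : (c != '/') = true := by simp [h]
      simp [if_neg h, h1, ih]

-- a decimal digit is neither '/' nor '-'
theorem digit_ne_slash (c : Char) (h : PySem.Chars.isdigit c = true) : (c != '/') = true := by
  simp only [bne_iff_ne, ne_eq]
  intro hc; subst hc
  exact absurd h (by decide)

theorem digit_ne_dash (c : Char) (h : PySem.Chars.isdigit c = true) : (c != '-') = true := by
  simp only [bne_iff_ne, ne_eq]
  intro hc; subst hc
  exact absurd h (by decide)

-- conditions and returned values of the two loops agree on the first '/'-segment:
-- B's test (nonempty digit run, bounded by end/'-'/'/') equals A's test (segment starts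
-- with a digit and its prefix before '-' is all digits), and on success both return that run.
theorem crux (l : List Char) :
    ((!(l.takeWhile PySem.Chars.isdigit).isEmpty &&
       ((l.dropWhile PySem.Chars.isdigit).isEmpty ||
        (l.dropWhile PySem.Chars.isdigit).headD ' ' == '-' ||
        (l.dropWhile PySem.Chars.isdigit).headD ' ' == '/')) =
     (!(l.takeWhile (fun c => c != '/')).isEmpty && aPartDigit (l.takeWhile (fun c => c != '/')) &&
       PySem.Chars.strIsdigit ((l.takeWhile (fun c => c != '/')).takeWhile (fun c => c != '-'))))
    ∧ ((l.takeWhile (fun c => c != '/')).takeWhile (fun c => c != '-') =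
        l.takeWhile PySem.Chars.isdigit
       ∨ (!(l.takeWhile PySem.Chars.isdigit).isEmpty &&
       ((l.dropWhile PySem.Chars.isdigit).isEmpty ||
        (l.dropWhile PySem.Chars.isdigit).headD ' ' == '-' ||
        (l.dropWhile PySem.Chars.isdigit).headD ' ' == '/')) = false) := by
  induction l with
  | nil => simp [PySem.Chars.strIsdigit]
  | cons c rest ih =>
    by_cases hd : PySem.Chars.isdigit c = true
    · have hs := digit_ne_slash c hd
      have hdash := digit_ne_dash c hd
      cases rest with
      | nil =>
        refine ⟨?_, Or.inl ?_⟩ <;>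
          simp [hd, hs, hdash, aPartDigit, PySem.Chars.strIsdigit]
      | cons r t =>
        by_cases hr : PySem.Chars.isdigit r = true
        · have hrs := digit_ne_slash r hr
          have hrd := digit_ne_dash r hr
          obtain ⟨ih1, ih2⟩ := ih
          simp only [List.takeWhile_cons, List.dropWhile_cons, hd, hs, hdash, hr, hrs, hrd,
            if_true, aPartDigit, PySem.Chars.strIsdigit, List.isEmpty_cons, Bool.not_false,
            Bool.true_and, Bool.and_true] at ih1 ih2 ⊢
          constructor
          · rw [ih1]
            simp [hr]
            exact fun _ => hd
          · rcases ih2 with h | h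
            · left; rw [h]
            · right; rw [← h]
        · -- r is not a digit: the run is [c] and everything is decided by r
          constructor
          · simp only [List.takeWhile_cons, List.dropWhile_cons, hd, hs, hdash, hr,
              aPartDigit, PySem.Chars.strIsdigit, if_true, Bool.false_eq_true, if_false,
              List.isEmpty_cons, Bool.not_false, Bool.true_and, List.headD_cons]
            by_cases h1 : r = '-'
            · simp [h1, hd]
            · by_cases h2 : r = '/'
              · simp [h2, hd]
              · have hr1 : (r != '-') = true := by simp [h1]
                have hr2 : (r != '/') = true := by simp [h2]
                simp [hr1, hr2, h1, h2, hd, hr]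
          · by_cases h1 : r = '-'
            · left
              simp [List.takeWhile_cons, hd, hs, hdash, h1]
              decide
            · by_cases h2 : r = '/'
              · left
                simp [List.takeWhile_cons, hd, hs, hdash, h2]
                decide
              · right
                simp [hd, hr, h1, h2]
    · -- c is not a digit: B's condition is false, and so is A's
      have hrun : (c :: rest).takeWhile PySem.Chars.isdigit = [] := by
        simp [hd]
      refine ⟨?_, Or.inr ?_⟩
      · rw [hrun]
        by_cases hc : c = '/'
        · simp [hc]
        · have h1 : (c != '/') = true := by simp [hc]
          simp [List.takeWhile_cons, h1, aPartDigit, hd]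
      · simp [hrun]

theorem main_loop : ∀ (n : Nat) (l : List Char), l.length ≤ n → aLoop (sp '/' l) = bLoop l := by
  intro n
  induction n with
  | zero =>
    intro l h
    have hl : l = [] := by cases l <;> simp_all
    subst hl
    simp [sp, aLoop, bLoop]
  | succ n ih =>
    intro l hlen
    cases l with
    | nil => simp [sp, aLoop, bLoop]
    | cons c rest =>
      obtain ⟨h1, h2⟩ := crux (c :: rest)
      rw [bLoop.eq_def]
      simp only [bDigits_spec]
      rw [sp_eq]
      simp only [aLoop]
      rw [splitOn_single '-', sp_eq '-']
      simp only [List.headD_cons]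
      by_cases hb : (!((c :: rest).takeWhile PySem.Chars.isdigit).isEmpty &&
          (((c :: rest).dropWhile PySem.Chars.isdigit).isEmpty ||
           ((c :: rest).dropWhile PySem.Chars.isdigit).headD ' ' == '-' ||
           ((c :: rest).dropWhile PySem.Chars.isdigit).headD ' ' == '/')) = true
      · rw [if_pos hb]
        rw [hb] at h1
        have h1' := h1.symm
        rw [Bool.and_eq_true, Bool.and_eq_true] at h1'
        obtain ⟨⟨ha1, ha2⟩, ha3⟩ := h1'
        simp only [ha1, ha2, ha3, Bool.true_and, if_true]
        rcases h2 with h | h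
        · exact h
        · rw [hb] at h; exact absurd h (by simp)
      · rw [if_neg hb]
        have hA : ¬ (!((c :: rest).takeWhile (fun c => c != '/')).isEmpty &&
            aPartDigit ((c :: rest).takeWhile (fun c => c != '/')) &&
            PySem.Chars.strIsdigit
              (((c :: rest).takeWhile (fun c => c != '/')).takeWhile (fun c => c != '-'))) = true := by
          rw [← h1]; exact hb
        have hrest : aLoop
            (match (c :: rest).dropWhile (fun c => c != '/') with
             | [] => []
             | _ :: rest => sp '/' rest) = bLoop (bSkip (c :: rest)) := by
          rw [bSkip_spec]
          cases hdw : (c :: rest).dropWhile (fun c => c != '/') with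
          | nil => simp [aLoop, bLoop]
          | cons x r =>
            simp only [List.tail_cons]
            apply ih
            have := List.length_dropWhile_le (fun c => c != '/') (c :: rest)
            rw [hdw] at this
            simp at this hlen
            omega
        rw [Bool.and_eq_true, not_and_or] at hA
        rcases hA with hA | hA
        · rw [if_neg (by simpa using hA)]
          exact hrest
        · by_cases hA1 : (!((c :: rest).takeWhile (fun c => c != '/')).isEmpty &&
              aPartDigit ((c :: rest).takeWhile (fun c => c != '/'))) = true
          · rw [if_pos hA1, if_neg (by simpa using hA)]
            exact hrest
          · rw [if_neg hA1]
            exact hrest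

-- ===== VERDICT (by name: the statement is the Claim_ definition above) =====
theorem extract_job_id_py_spec : Claim_equal_extract_job_id_py := by
  intro url _
  unfold Spec_extract_job_id_py extract_job_id_py extract_job_id_py_alt
  by_cases h : url = ""
  · subst h; simp [bLoop]
  · rw [if_pos h, splitOn_single, main_loop url.toList.length url.toList le_rfl]
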